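-- pv_equiv track=rewrite | github.com/aduda9/mpi-backend | part_lookup/ebay_part_lookup.py | extract_part_data_from_titles
-- ===== SOURCE A (Python) =====
-- import collections
-- import string
--
-- def extract_part_data_from_titles(titles,part_number,manufacturers=[],blacklist=[]):
--
--     #helper function for filtering a list of tuples
--     def filter_kv_pairs(kv_pair_list,func):
--         return [(k,v) for k,v in kv_pair_list if func(k,v)]
--
--     # create list of all the words in the titles
--     # titles=[]
--     words = ' '.join(titles).split(' ')
--     words = [w.upper() for w in words]
--
--     # create frequency map of all words in titles (list of (word,frequency))
--     # Note: this respects the order in which words were seen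
--
--     counts = collections.OrderedDict()
--
--     for title in titles:
--         for word in title.split(' '):
--             word=word.upper()
--             word=word.rstrip(string.punctuation)
--             if word in counts:
--                 counts[word]+=1
--             else:
--                 counts[word]=1
--
--     word_counts=counts.items()
--
--     title_exclude_list = manufacturers+blacklist+[part_number]
--
--     #if in half of the results, word is probably relevant
--     relevance_count = len(titles) // 2
--
--
--     #relevant words
--     s_words = filter_kv_pairs(word_counts, lambda _,count: count > relevance_count)
--     #list of manufacturer names found
--     s_manufacturers = filter_kv_pairs(s_words,lambda word,_: word in manufacturers)
--     s_manufacturers.sort(key=lambda m:m[1],reverse=True)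
--
--     #filter out manufacturer words, words from blacklist, and part number
--     s_words = filter_kv_pairs(s_words,lambda word,_: word not in title_exclude_list)
--
--     title = " ".join([word for word,value in s_words]) if s_words else None
--     manufacturer = s_manufacturers[0][0] if s_manufacturers else None
--
--     return {
--         'title':title,
--         'manufacturer':manufacturer,
--         'part_number':part_number,
--     }
-- ===== SOURCE B (Python) =====
-- import collections
-- import string
--
--
-- def extract_part_data_from_titles(titles, part_number, manufacturers=[], blacklist=[]):
--     # order-preserving word -> count map, same normalisation as before
--     counts = collections.OrderedDict()
--     for title in titles:
--         for word in title.split(' '):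
--             word = word.upper().rstrip(string.punctuation)
--             counts[word] = counts.get(word, 0) + 1
--
--     threshold = len(titles) // 2
--     excluded = set(manufacturers + blacklist + [part_number])
--
--     # single pass: collect relevant words and track the best manufacturer
--     relevant = []
--     best_word, best_count = None, None
--     for word, count in counts.items():
--         if count > threshold:
--             if word in manufacturers and (best_count is None or count > best_count):
--                 best_word, best_count = word, count
--             if word not in excluded:
--                 relevant.append(word)
--
--     return {
--         'title': ' '.join(relevant) if relevant else None,
--         'manufacturer': best_word,
--         'part_number': part_number,
--     }
-- ===== Notes on version B (the rewrite author's own statement) =====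
-- stated objective: simpler
-- what changed: Replaces A's filter_kv_pairs/filter/stable-reverse-sort/index-0 pipeline over the word-count items with a single pass that collects the relevant words and tracks the best manufacturer by strict-greater count, and drops the dead words list.
import Mathlib
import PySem

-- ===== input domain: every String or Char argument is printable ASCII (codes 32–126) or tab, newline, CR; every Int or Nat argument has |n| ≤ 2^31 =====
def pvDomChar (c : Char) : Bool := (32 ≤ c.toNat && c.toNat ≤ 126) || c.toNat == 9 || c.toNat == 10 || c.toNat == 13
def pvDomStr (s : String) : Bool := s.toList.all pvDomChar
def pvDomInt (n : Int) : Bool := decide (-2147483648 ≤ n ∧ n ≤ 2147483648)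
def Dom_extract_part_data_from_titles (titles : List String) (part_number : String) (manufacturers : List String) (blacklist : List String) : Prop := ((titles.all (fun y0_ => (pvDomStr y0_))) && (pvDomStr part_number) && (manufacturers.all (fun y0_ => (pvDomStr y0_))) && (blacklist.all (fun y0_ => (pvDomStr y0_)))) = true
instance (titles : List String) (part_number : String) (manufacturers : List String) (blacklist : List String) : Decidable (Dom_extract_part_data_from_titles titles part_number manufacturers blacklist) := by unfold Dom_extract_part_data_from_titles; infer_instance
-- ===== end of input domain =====

-- B replaces A's filter/filter/stable-reverse-sort/index-0 pipeline by one pass over the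
-- word-count items that collects the relevant words and tracks the best manufacturer
-- (objective: simpler).

-- ===== PORT A =====

-- string.punctuation
def pvPunct : List Char := "!\"#$%&'()*+,-./:;<=>?@[\\]^_`{|}~".toList

-- word.rstrip(string.punctuation): exact hand port (PySem has no rstrip-with-chars);
-- strips the longest suffix of punctuation characters.
def pvRstripPunct (s : String) : String :=
  String.ofList ((s.toList.reverse.dropWhile (fun c => pvPunct.contains c)).reverse)

-- s.split(' ') (separator a single space)
def pvSplitSpace (s : String) : List String :=
  (PySem.Chars.splitOn s.toList [' ']).map String.ofList

-- A's local helper filter_kv_pairs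
def pvFilterKV (l : List (String × Int)) (f : String → Int → Bool) : List (String × Int) :=
  l.filter (fun kv => f kv.1 kv.2)

def extract_part_data_from_titles (titles : List String) (part_number : String) (manufacturers : List String) (blacklist : List String) : List (String × Option String) :=
  -- words = ' '.join(titles).split(' '); words = [w.upper() for w in words]  (dead in A, kept)
  let _words := (pvSplitSpace (PySem.Str.join " " titles)).map PySem.Str.upper
  let counts : PySem.Dict String Int :=
    titles.foldl (fun d title =>
      (pvSplitSpace title).foldl (fun d word =>
        let word := PySem.Str.upper word
        let word := pvRstripPunct word
        if d.contains word then d.modify word 0 (· + 1) else d.insert word 1) d)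
      PySem.Dict.empty
  let word_counts := counts.items
  let title_exclude_list := manufacturers ++ blacklist ++ [part_number]
  let relevance_count : Int := (titles.length : Int) / 2
  let s_words := pvFilterKV word_counts (fun _ count => count > relevance_count)
  let s_manufacturers := pvFilterKV s_words (fun word _ => manufacturers.contains word)
  let s_manufacturers := PySem.List.sorted s_manufacturers (fun m => m.2) true
  let s_words := pvFilterKV s_words (fun word _ => !(title_exclude_list.contains word))
  let title : Option String :=
    if s_words ≠ [] then some (PySem.Str.join " " (s_words.map (·.1))) else none
  let manufacturer : Option String :=
    match s_manufacturers with | [] => none | m :: _ => some m.1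
  [("title", title), ("manufacturer", manufacturer), ("part_number", some part_number)]

-- ===== PORT B =====

def extract_part_data_from_titles_alt (titles : List String) (part_number : String) (manufacturers : List String) (blacklist : List String) : List (String × Option String) :=
  let counts : PySem.Dict String Int :=
    titles.foldl (fun d title =>
      (pvSplitSpace title).foldl (fun d word =>
        let word := pvRstripPunct (PySem.Str.upper word)
        d.insert word (d.getD word 0 + 1)) d)
      PySem.Dict.empty
  let threshold : Int := (titles.length : Int) / 2
  let excluded : PySem.Set String := PySem.Set.ofList (manufacturers ++ blacklist ++ [part_number])
  let st := counts.items.foldl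
    (fun (st : List String × Option (String × Int)) wc =>
      if wc.2 > threshold then
        let best := if manufacturers.contains wc.1 &&
            (match st.2 with | none => true | some b => decide (wc.2 > b.2))
          then some wc else st.2
        let rel := if !excluded.contains wc.1 then st.1 ++ [wc.1] else st.1
        (rel, best)
      else st)
    ([], none)
  let title : Option String :=
    if st.1 ≠ [] then some (PySem.Str.join " " st.1) else none
  [("title", title), ("manufacturer", st.2.map (·.1)), ("part_number", some part_number)]

-- ===== PRECONDITION & SPEC =====
def Spec_extract_part_data_from_titles (titles : List String) (part_number : String) (manufacturers : List String) (blacklist : List String) (out : List (String × Option String)) : Prop := out = extract_part_data_from_titles_alt titles part_number manufacturers blacklist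
instance (titles : List String) (part_number : String) (manufacturers : List String) (blacklist : List String) (out : List (String × Option String)) : Decidable (Spec_extract_part_data_from_titles titles part_number manufacturers blacklist out) := by unfold Spec_extract_part_data_from_titles; infer_instance

-- ===== CLAIM (what is proved, stated in full; the proofs are below) =====
def Claim_equal_extract_part_data_from_titles : Prop := ∀ (titles : List String) (part_number : String) (manufacturers : List String) (blacklist : List String), Dom_extract_part_data_from_titles titles part_number manufacturers blacklist → Spec_extract_part_data_from_titles titles part_number manufacturers blacklist (extract_part_data_from_titles titles part_number manufacturers blacklist)

-- ===== LEMMAS AND PROOFS =====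

-- A's and B's per-word counter updates coincide
theorem pv_count_step (d : PySem.Dict String Int) (w : String) :
    (if d.contains w then d.modify w 0 (· + 1) else d.insert w 1)
      = d.insert w (d.getD w 0 + 1) := by
  by_cases h : d.contains w
  · simp [h, PySem.Dict.modify]
  · have hg : d.get? w = none := by
      simp only [PySem.Dict.contains, List.any_eq_true, not_exists] at h
      push Not at h
      simp [PySem.Dict.get?, List.find?_eq_none]
      intro a b hp hb
      exact absurd (h (a, b) hp) (by simpa using hb)
    simp [h, PySem.Dict.getD, hg]

theorem pv_contains_ofList (ex : List String) (w : String) :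
    (PySem.Set.ofList ex).contains w = ex.contains w := by
  by_cases h : w ∈ ex <;> simp [PySem.Set.mem_ofList, h]

-- head of the insertion-sort fold = the strict-greater best fold
theorem pv_head_insertBy (l : List (String × Int)) (ys : List (String × Int)) :
    (l.foldl (fun acc x => PySem.List.insertBy (fun a b => decide ((b.2 : Int) < a.2)) x acc) ys).head?
      = l.foldl (fun b x => if (match b with | none => true | some c => decide (x.2 > c.2)) then some x else b) ys.head? := by
  induction l generalizing ys with
  | nil => rfl
  | cons x l ih =>
    simp only [List.foldl_cons]
    rw [ih]
    congr 1
    cases ys with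
    | nil => simp [PySem.List.insertBy]
    | cons y t =>
      simp only [PySem.List.insertBy]
      by_cases h : (y.2 : Int) < x.2
      · simp [h, gt_iff_lt]
      · simp [h, gt_iff_lt]

-- B's single loop computed over any prefix state
theorem pv_loop (thr : Int) (man ex : List String) (l : List (String × Int))
    (acc : List String) (b : Option (String × Int)) :
    l.foldl (fun (st : List String × Option (String × Int)) wc =>
      if wc.2 > thr then
        (if !ex.contains wc.1 then st.1 ++ [wc.1] else st.1,
         if man.contains wc.1 &&
            (match st.2 with | none => true | some c => decide (wc.2 > c.2))
          then some wc else st.2)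
      else st) (acc, b)
    = (acc ++ ((l.filter (fun wc => decide (wc.2 > thr) && !ex.contains wc.1)).map (·.1)),
       (l.filter (fun wc => decide (wc.2 > thr) && man.contains wc.1)).foldl
         (fun b x => if (match b with | none => true | some c => decide (x.2 > c.2)) then some x else b) b) := by
  induction l generalizing acc b with
  | nil => simp
  | cons x l ih =>
    rw [List.foldl_cons, List.filter_cons, List.filter_cons]
    by_cases hx : x.2 > thr
    · rw [if_pos hx, ih]
      simp only [hx, decide_true, Bool.true_and]
      by_cases he : x.1 ∈ ex <;> by_cases hm : x.1 ∈ man <;> simp [he, hm]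
    · rw [if_neg hx, ih]
      simp [hx]

-- ===== VERDICT (by name: the statement is the Claim_ definition above) =====
theorem extract_part_data_from_titles_spec : Claim_equal_extract_part_data_from_titles := by
  intro titles part_number manufacturers blacklist _
  unfold Spec_extract_part_data_from_titles
  unfold extract_part_data_from_titles extract_part_data_from_titles_alt
  have hcounts :
      (List.foldl (fun d title =>
        List.foldl (fun (d : PySem.Dict String Int) word =>
          if d.contains (pvRstripPunct (PySem.Str.upper word)) then
            d.modify (pvRstripPunct (PySem.Str.upper word)) 0 (· + 1)
          else d.insert (pvRstripPunct (PySem.Str.upper word)) 1) d (pvSplitSpace title))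
        PySem.Dict.empty titles)
      = (List.foldl (fun d title =>
        List.foldl (fun (d : PySem.Dict String Int) word =>
          d.insert (pvRstripPunct (PySem.Str.upper word))
            (d.getD (pvRstripPunct (PySem.Str.upper word)) 0 + 1)) d (pvSplitSpace title))
        PySem.Dict.empty titles) := by
    congr 1
    funext d title
    congr 1
    funext d word
    exact pv_count_step d (pvRstripPunct (PySem.Str.upper word))
  rw [← hcounts]
  simp only [pv_contains_ofList]
  rw [pv_loop ((titles.length : Int) / 2) manufacturers
      (manufacturers ++ blacklist ++ [part_number])
      (List.foldl (fun d title =>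
        List.foldl (fun (d : PySem.Dict String Int) word =>
          if d.contains (pvRstripPunct (PySem.Str.upper word)) then
            d.modify (pvRstripPunct (PySem.Str.upper word)) 0 (· + 1)
          else d.insert (pvRstripPunct (PySem.Str.upper word)) 1) d (pvSplitSpace title))
        PySem.Dict.empty titles).items [] none]
  have hW : pvFilterKV (pvFilterKV (List.foldl (fun d title =>
        List.foldl (fun (d : PySem.Dict String Int) word =>
          if d.contains (pvRstripPunct (PySem.Str.upper word)) then
            d.modify (pvRstripPunct (PySem.Str.upper word)) 0 (· + 1)
          else d.insert (pvRstripPunct (PySem.Str.upper word)) 1) d (pvSplitSpace title))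
        PySem.Dict.empty titles).items (fun _ count => count > (titles.length : Int) / 2))
        (fun word _ => !((manufacturers ++ blacklist ++ [part_number]).contains word))
      = (List.foldl (fun d title =>
        List.foldl (fun (d : PySem.Dict String Int) word =>
          if d.contains (pvRstripPunct (PySem.Str.upper word)) then
            d.modify (pvRstripPunct (PySem.Str.upper word)) 0 (· + 1)
          else d.insert (pvRstripPunct (PySem.Str.upper word)) 1) d (pvSplitSpace title))
        PySem.Dict.empty titles).items.filter
          (fun wc => decide (wc.2 > (titles.length : Int) / 2) &&
            !(manufacturers ++ blacklist ++ [part_number]).contains wc.1) := by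
    simp only [pvFilterKV, List.filter_filter]
    apply List.filter_congr
    intro a _
    simp [Bool.and_comm]
  have hM : pvFilterKV (pvFilterKV (List.foldl (fun d title =>
        List.foldl (fun (d : PySem.Dict String Int) word =>
          if d.contains (pvRstripPunct (PySem.Str.upper word)) then
            d.modify (pvRstripPunct (PySem.Str.upper word)) 0 (· + 1)
          else d.insert (pvRstripPunct (PySem.Str.upper word)) 1) d (pvSplitSpace title))
        PySem.Dict.empty titles).items (fun _ count => count > (titles.length : Int) / 2))
        (fun word _ => manufacturers.contains word)
      = (List.foldl (fun d title =>
        List.foldl (fun (d : PySem.Dict String Int) word =>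
          if d.contains (pvRstripPunct (PySem.Str.upper word)) then
            d.modify (pvRstripPunct (PySem.Str.upper word)) 0 (· + 1)
          else d.insert (pvRstripPunct (PySem.Str.upper word)) 1) d (pvSplitSpace title))
        PySem.Dict.empty titles).items.filter
          (fun wc => decide (wc.2 > (titles.length : Int) / 2) &&
            manufacturers.contains wc.1) := by
    simp only [pvFilterKV, List.filter_filter]
    apply List.filter_congr
    intro a _
    simp [Bool.and_comm]
  rw [hW, hM]
  have hhead : (PySem.List.sorted
        ((List.foldl (fun d title =>
          List.foldl (fun (d : PySem.Dict String Int) word =>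
            if d.contains (pvRstripPunct (PySem.Str.upper word)) then
              d.modify (pvRstripPunct (PySem.Str.upper word)) 0 (· + 1)
            else d.insert (pvRstripPunct (PySem.Str.upper word)) 1) d (pvSplitSpace title))
          PySem.Dict.empty titles).items.filter
            (fun wc => decide (wc.2 > (titles.length : Int) / 2) &&
              manufacturers.contains wc.1))
        (fun m => m.2) true).head?
      = ((List.foldl (fun d title =>
          List.foldl (fun (d : PySem.Dict String Int) word =>
            if d.contains (pvRstripPunct (PySem.Str.upper word)) then
              d.modify (pvRstripPunct (PySem.Str.upper word)) 0 (· + 1)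
            else d.insert (pvRstripPunct (PySem.Str.upper word)) 1) d (pvSplitSpace title))
          PySem.Dict.empty titles).items.filter
            (fun wc => decide (wc.2 > (titles.length : Int) / 2) &&
              manufacturers.contains wc.1)).foldl
          (fun b x => if (match b with | none => true | some c => decide (x.2 > c.2)) then some x else b)
          none := by
    rw [PySem.List.sorted_rev_eq_foldl_insertBy]
    exact pv_head_insertBy _ []
  simp only [List.cons.injEq, Prod.mk.injEq, true_and, and_true]
  refine ⟨?_, ?_⟩
  · -- title
    simp only [List.nil_append]
    have hcond : (List.map (fun (x : String × Int) => x.1) (List.filter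
        (fun wc => decide (wc.2 > ((titles.length : Int)) / 2) &&
          !(manufacturers ++ blacklist ++ [part_number]).contains wc.1)
        (List.foldl (fun d title =>
          List.foldl (fun (d : PySem.Dict String Int) word =>
            if d.contains (pvRstripPunct (PySem.Str.upper word)) then
              d.modify (pvRstripPunct (PySem.Str.upper word)) 0 (· + 1)
            else d.insert (pvRstripPunct (PySem.Str.upper word)) 1) d (pvSplitSpace title))
          PySem.Dict.empty titles).items) ≠ []) = ((List.filter
        (fun wc => decide (wc.2 > ((titles.length : Int)) / 2) &&
          !(manufacturers ++ blacklist ++ [part_number]).contains wc.1)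
        (List.foldl (fun d title =>
          List.foldl (fun (d : PySem.Dict String Int) word =>
            if d.contains (pvRstripPunct (PySem.Str.upper word)) then
              d.modify (pvRstripPunct (PySem.Str.upper word)) 0 (· + 1)
            else d.insert (pvRstripPunct (PySem.Str.upper word)) 1) d (pvSplitSpace title))
          PySem.Dict.empty titles).items) ≠ []) := by simp
    simp only [hcond]
  · -- manufacturer
    rw [← hhead]
    cases _h : (PySem.List.sorted
        ((List.foldl (fun d title =>
          List.foldl (fun (d : PySem.Dict String Int) word =>
            if d.contains (pvRstripPunct (PySem.Str.upper word)) then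
              d.modify (pvRstripPunct (PySem.Str.upper word)) 0 (· + 1)
            else d.insert (pvRstripPunct (PySem.Str.upper word)) 1) d (pvSplitSpace title))
          PySem.Dict.empty titles).items.filter
            (fun wc => decide (wc.2 > (titles.length : Int) / 2) &&
              manufacturers.contains wc.1))
        (fun m => m.2) true) <;> rfl
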